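-- pv_equiv track=rewrite | github.com/volcengine/verl | atropos/environments/community/protein_design/models/alphafold2_multimer.py | _split_pdb_content
-- ===== SOURCE A (Python) =====
-- from typing import Any, Dict, List, Optional, Tuple
--
-- def _split_pdb_content(concatenated_pdb_str: str) -> List[str]:
--     """
--     Splits a string containing concatenated PDB file contents.
--     Assumes models are separated by "ENDMDL" or just "END" for the last/single model.
--     """
--     pdbs = []
--     current_pdb_lines = []
--     if not concatenated_pdb_str:
--         return []
--
--     for line in concatenated_pdb_str.splitlines(keepends=True):
--         current_pdb_lines.append(line)
--         if line.startswith("ENDMDL") or line.startswith("END "):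
--             pdbs.append("".join(current_pdb_lines).strip())
--             current_pdb_lines = []
--
--     if current_pdb_lines:
--         remaining_pdb = "".join(current_pdb_lines).strip()
--         if remaining_pdb:
--             pdbs.append(remaining_pdb)
--
--     return [pdb for pdb in pdbs if pdb]
-- ===== SOURCE B (Python) =====
-- from typing import List
--
--
-- def _split_pdb_content(concatenated_pdb_str: str) -> List[str]:
--     """Single reverse pass: group lines back-to-front, closing a group at each
--     delimiter line, then join/strip each group and drop empty chunks."""
--     rgroups = [[]]  # groups in reverse order; each group's lines in reverse order
--     for line in reversed(concatenated_pdb_str.splitlines(keepends=True)):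
--         if line.startswith("ENDMDL") or line.startswith("END "):
--             rgroups.append([line])
--         else:
--             rgroups[-1].append(line)
--     chunks = ["".join(reversed(g)).strip() for g in reversed(rgroups)]
--     return [c for c in chunks if c]
-- ===== Notes on version B (the rewrite author's own statement) =====
-- stated objective: alternative
-- what changed: Replaces A's forward accumulate-and-flush loop (with a special trailing-remainder case) by a single reverse pass that groups lines back-to-front, so every chunk including the tail falls out of one uniform grouping followed by one join/strip/filter step.
import Mathlib
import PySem

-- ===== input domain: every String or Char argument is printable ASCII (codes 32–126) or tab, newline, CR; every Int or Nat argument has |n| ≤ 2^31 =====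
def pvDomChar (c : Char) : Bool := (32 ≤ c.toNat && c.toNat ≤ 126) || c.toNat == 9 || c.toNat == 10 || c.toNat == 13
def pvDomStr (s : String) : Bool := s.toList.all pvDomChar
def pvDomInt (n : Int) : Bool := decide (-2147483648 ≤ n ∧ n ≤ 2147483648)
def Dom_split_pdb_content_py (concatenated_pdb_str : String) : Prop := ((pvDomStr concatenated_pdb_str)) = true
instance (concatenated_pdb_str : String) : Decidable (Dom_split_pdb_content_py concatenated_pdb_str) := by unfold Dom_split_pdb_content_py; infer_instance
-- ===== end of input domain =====

-- B replaces A's forward accumulate-and-flush loop by a single reverse pass that groups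
-- lines back-to-front; same cost, uniform handling of the trailing chunk (objective: alternative).

-- shared helper: Python's str.splitlines(keepends=True); exact on Dom (the only line
-- breaks a Dom string can contain are '\n', '\r' and '\r\n')
def pyKeepLines (acc : List Char) : List Char → List (List Char)
  | [] => if acc = [] then [] else [acc]
  | '\r' :: '\n' :: rest => (acc ++ ['\r', '\n']) :: pyKeepLines [] rest
  | '\r' :: rest => (acc ++ ['\r']) :: pyKeepLines [] rest
  | '\n' :: rest => (acc ++ ['\n']) :: pyKeepLines [] rest
  | c :: rest => pyKeepLines (acc ++ [c]) rest

-- shared helper: line.startswith("ENDMDL") or line.startswith("END ")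
def isBoundLine (ln : List Char) : Bool :=
  PySem.Chars.startswith ln "ENDMDL".toList || PySem.Chars.startswith ln "END ".toList

-- ===== PORT A =====
def pvAStep (st : List String × List (List Char)) (line : List Char) :
    List String × List (List Char) :=
  let cur := st.2 ++ [line]
  if isBoundLine line then
    (st.1 ++ [String.mk (PySem.Chars.strip cur.flatten)], [])
  else (st.1, cur)

def split_pdb_content_py (concatenated_pdb_str : String) : List String :=
  if concatenated_pdb_str = "" then []
  else
    let st := (pyKeepLines [] concatenated_pdb_str.toList).foldl pvAStep ([], [])
    let pdbs :=
      if st.2 ≠ [] then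
        let remaining := PySem.Chars.strip st.2.flatten
        if remaining ≠ [] then st.1 ++ [String.mk remaining] else st.1
      else st.1
    pdbs.filter (fun p => p ≠ "")

-- ===== PORT B =====
-- one step of the reverse pass: new group at a delimiter, else line joins the last group
def pvRStep (rgs : List (List (List Char))) (ln : List Char) : List (List (List Char)) :=
  if isBoundLine ln then rgs ++ [[ln]]
  else rgs.dropLast ++ [rgs.getLastD [] ++ [ln]]

def split_pdb_content_py_alt (concatenated_pdb_str : String) : List String :=
  let rgroups := (pyKeepLines [] concatenated_pdb_str.toList).reverse.foldl pvRStep [[]]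
  (rgroups.reverse.map (fun g => String.mk (PySem.Chars.strip g.reverse.flatten))).filter
    (fun c => c ≠ "")

-- ===== PRECONDITION & SPEC =====
def Spec_split_pdb_content_py (concatenated_pdb_str : String) (out : List String) : Prop := out = split_pdb_content_py_alt concatenated_pdb_str
instance (concatenated_pdb_str : String) (out : List String) : Decidable (Spec_split_pdb_content_py concatenated_pdb_str out) := by unfold Spec_split_pdb_content_py; infer_instance

-- ===== CLAIM (what is proved, stated in full; the proofs are below) =====
def Claim_equal_split_pdb_content_py : Prop := ∀ (concatenated_pdb_str : String), Dom_split_pdb_content_py concatenated_pdb_str → Spec_split_pdb_content_py concatenated_pdb_str (split_pdb_content_py concatenated_pdb_str)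

-- ===== LEMMAS AND PROOFS =====

-- reference grouping: foldr form of B's reverse pass
def pvGroups : List (List Char) → List (List (List Char))
  | [] => [[]]
  | l :: rest =>
    let gs := pvGroups rest
    if isBoundLine l then [l] :: gs
    else
      match gs with
      | g :: gt => (l :: g) :: gt
      | [] => [[l]]

def pvChunk (g : List (List Char)) : String := String.mk (PySem.Chars.strip g.flatten)

lemma pvGroups_ne_nil (ls : List (List Char)) : pvGroups ls ≠ [] := by
  induction ls with
  | nil => simp [pvGroups]
  | cons l rest ih =>
    simp only [pvGroups]
    split
    · simp
    · cases h : pvGroups rest with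
      | nil => simp
      | cons g gt => simp

lemma pvRStep_foldl_ne_nil (ls : List (List Char)) (rgs : List (List (List Char)))
    (h : rgs ≠ []) : ls.foldl pvRStep rgs ≠ [] := by
  induction ls generalizing rgs with
  | nil => simpa using h
  | cons l rest ih =>
    rw [List.foldl_cons]
    apply ih
    unfold pvRStep
    split <;> simp

lemma pvB_groups (lines : List (List Char)) :
    (lines.reverse.foldl pvRStep [[]]).reverse.map List.reverse = pvGroups lines := by
  induction lines with
  | nil => simp [pvGroups]
  | cons l rest ih =>
    rw [List.reverse_cons, List.foldl_append]
    simp only [List.foldl_cons, List.foldl_nil]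
    set gs := rest.reverse.foldl pvRStep [[]] with hgs
    have hne : gs ≠ [] := pvRStep_foldl_ne_nil _ _ (by simp)
    rw [pvGroups]
    by_cases hb : isBoundLine l
    · simp [pvRStep, hb, ← ih]
    · obtain ⟨a, t, hgsr⟩ : ∃ a t, gs.reverse = a :: t := by
        cases h : gs.reverse with
        | nil => exact absurd (by simpa using h) hne
        | cons a t => exact ⟨a, t, rfl⟩
      have hgseq : gs = t.reverse ++ [a] := by
        rw [← List.reverse_reverse gs, hgsr]; simp
      rw [← ih, hgsr]
      simp [pvRStep, hb, hgseq]

lemma pvA_key (lines : List (List Char)) : ∀ (p : List String) (cur : List (List Char)),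
    (let st := lines.foldl pvAStep (p, cur);
     (if st.2 ≠ [] then
        if PySem.Chars.strip st.2.flatten ≠ [] then st.1 ++ [String.mk (PySem.Chars.strip st.2.flatten)]
        else st.1
      else st.1).filter (fun x => x ≠ ""))
    = (p ++ (match pvGroups lines with
             | g :: gt => (cur ++ g) :: gt
             | [] => [cur]).map pvChunk).filter (fun x => x ≠ "") := by
  induction lines with
  | nil =>
    intro p cur
    simp only [List.foldl_nil, pvGroups, List.append_nil, List.map_cons, List.map_nil]
    by_cases hc : cur = []
    · subst hc
      have : pvChunk [] = "" := by decide
      simp [this, List.filter_append]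
    · rw [if_pos hc]
      by_cases hs : PySem.Chars.strip cur.flatten = []
      · rw [if_neg (by simp [hs])]
        have : pvChunk cur = "" := by simp [pvChunk, hs]; decide
        simp [this, List.filter_append]
      · rw [if_pos hs]
        simp [pvChunk, List.filter_append]
  | cons l rest ih =>
    intro p cur
    simp only [List.foldl_cons]
    rw [pvGroups]
    by_cases hb : isBoundLine l
    · rw [show pvAStep (p, cur) l
          = (p ++ [String.mk (PySem.Chars.strip (cur ++ [l]).flatten)], []) by
        simp [pvAStep, hb]]
      rw [ih]
      simp only [hb, if_pos]
      cases h : pvGroups rest with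
      | nil => exact absurd h (pvGroups_ne_nil rest)
      | cons g gt =>
        simp [pvChunk, List.filter_append, List.append_assoc]
    · rw [show pvAStep (p, cur) l = (p, cur ++ [l]) by simp [pvAStep, hb]]
      rw [ih]
      simp only [hb, if_neg, Bool.false_eq_true, not_false_iff]
      cases h : pvGroups rest with
      | nil => exact absurd h (pvGroups_ne_nil rest)
      | cons g gt => simp

-- ===== VERDICT (by name: the statement is the Claim_ definition above) =====
theorem split_pdb_content_py_spec : Claim_equal_split_pdb_content_py := by
  intro s _
  unfold Spec_split_pdb_content_py
  by_cases hs : s = ""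
  · subst hs; decide
  · unfold split_pdb_content_py split_pdb_content_py_alt
    rw [if_neg hs]
    set lines := pyKeepLines [] s.toList with hlines
    have hB : ((lines.reverse.foldl pvRStep [[]]).reverse.map
          (fun g => String.mk (PySem.Chars.strip g.reverse.flatten))).filter (fun c => c ≠ "")
        = ((pvGroups lines).map pvChunk).filter (fun c => c ≠ "") := by
      rw [← pvB_groups lines, List.map_map]
      simp only [Function.comp_def, pvChunk]
    have hA := pvA_key lines [] []
    simp only at hA
    rw [hA]
    rw [hB]
    cases h : pvGroups lines with
    | nil => exact absurd h (pvGroups_ne_nil lines)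
    | cons g gt => simp
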